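-- pv_equiv track=rewrite | github.com/Her-dev/algoritmos-y-programacion-1 | Guia/serie9/ejp1.py | arregla_juntada
-- ===== SOURCE A (Python) =====
-- def arregla_juntada(disponibilidades):
-- 	"""Recibe un diccionario cuyas claves son los nombres de amigos y sus valores los días que NO pueden juntarse
-- 	Devuelve un diccionario con todos los días y valores qué amigo puede ese día"""
-- 	coincidencias = {}
--
-- 	for i in range(1,32):
-- 		coincidencias[i] = []
-- 		for amigo in disponibilidades:
-- 			if i not in disponibilidades[amigo]:
-- 				coincidencias[i].append(amigo)
--
-- 	return coincidencias
-- ===== SOURCE B (Python) =====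
-- def arregla_juntada(disponibilidades):
-- 	"""Recibe un diccionario cuyas claves son los nombres de amigos y sus valores los días que NO pueden juntarse
-- 	Devuelve un diccionario con todos los días y valores qué amigo puede ese día"""
-- 	coincidencias = {d: list(disponibilidades) for d in range(1, 32)}
-- 	for amigo, dias in disponibilidades.items():
-- 		for d in dias:
-- 			if d in coincidencias and amigo in coincidencias[d]:
-- 				coincidencias[d].remove(amigo)
-- 	return coincidencias
-- ===== Notes on version B (the rewrite author's own statement) =====
-- stated objective: alternative
-- what changed: A scans every friend's whole unavailable-day list for each of the 31 days; B seeds every day with all friends and makes one pass over each friend's unavailable-day entries, removing the friend from just those days (it trades the per-day membership scans for per-entry list removals).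
import Mathlib
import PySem

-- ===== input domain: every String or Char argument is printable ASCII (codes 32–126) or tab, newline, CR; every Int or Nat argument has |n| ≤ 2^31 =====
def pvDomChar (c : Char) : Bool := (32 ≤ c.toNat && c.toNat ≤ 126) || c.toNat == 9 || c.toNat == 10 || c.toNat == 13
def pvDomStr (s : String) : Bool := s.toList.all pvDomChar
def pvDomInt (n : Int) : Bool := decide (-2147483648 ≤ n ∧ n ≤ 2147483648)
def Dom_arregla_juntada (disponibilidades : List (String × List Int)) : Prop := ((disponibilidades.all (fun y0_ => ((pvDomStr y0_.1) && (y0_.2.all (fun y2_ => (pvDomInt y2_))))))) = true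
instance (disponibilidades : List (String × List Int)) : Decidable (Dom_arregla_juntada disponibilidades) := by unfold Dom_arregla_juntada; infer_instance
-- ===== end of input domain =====

-- B seeds every day with all friends and makes one pass over the unavailable entries,
-- removing friends from the affected days — a subtractive alternative to A's per-day scans.

-- ===== PORT A =====
-- inner loop body: 'if i not in disponibilidades[amigo]: coincidencias[i].append(amigo)'
-- (disponibilidades[amigo]: the key is always present, amigo iterates the dict itself, so getD is exact)
def pvAIn (disp : List (String × List Int)) (i : Int)
    (co : PySem.Dict Int (List String)) (p : String × List Int) : PySem.Dict Int (List String) :=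
  if !((PySem.Dict.mk disp).getD p.1 []).contains i then
    co.modify i [] (fun l => l ++ [p.1])
  else co

-- outer loop body: 'coincidencias[i] = []' then the inner loop over the friends
def pvAStep (disp : List (String × List Int))
    (co : PySem.Dict Int (List String)) (i : Int) : PySem.Dict Int (List String) :=
  disp.foldl (pvAIn disp i) (co.insert i [])

def arregla_juntada (disponibilidades : List (String × List Int)) : List (Int × List String) :=
  let coincidencias : PySem.Dict Int (List String) := PySem.Dict.empty
  let coincidencias := (PySem.List.pyRange 1 32).foldl (pvAStep disponibilidades) coincidencias
  coincidencias.items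

-- ===== PORT B =====
-- 'coincidencias[d].remove(amigo)': the guard ensures amigo ∈ coincidencias[d], so remove? is some (exact)
def pvBIn (a : String) (co : PySem.Dict Int (List String)) (d : Int) : PySem.Dict Int (List String) :=
  if co.contains d && (co.getD d []).contains a then
    co.modify d [] (fun l => (PySem.List.remove? l a).getD l)
  else co

def pvBStep (co : PySem.Dict Int (List String)) (p : String × List Int) : PySem.Dict Int (List String) :=
  p.2.foldl (pvBIn p.1) co

def arregla_juntada_alt (disponibilidades : List (String × List Int)) : List (Int × List String) :=
  let coincidencias : PySem.Dict Int (List String) :=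
    PySem.Dict.mk ((PySem.List.pyRange 1 32).map (fun d => (d, disponibilidades.map Prod.fst)))
  let coincidencias := disponibilidades.foldl pvBStep coincidencias
  coincidencias.items

-- ===== PRECONDITION & SPEC =====
-- Pre_ requires distinct friend names: the argument encodes a Python dict, whose keys are
-- necessarily distinct, so duplicate-key association lists correspond to no Python input.
def Pre_arregla_juntada (disponibilidades : List (String × List Int)) : Prop :=
  (disponibilidades.map Prod.fst).Nodup
instance (disponibilidades : List (String × List Int)) : Decidable (Pre_arregla_juntada disponibilidades) := by unfold Pre_arregla_juntada; infer_instance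

def pvWitness_arregla_juntada : (List (String × List Int)) := [("ana", [1, 2, 40]), ("bob", [2, 2])]

def Spec_arregla_juntada (disponibilidades : List (String × List Int)) (out : List (Int × List String)) : Prop := out = arregla_juntada_alt disponibilidades
instance (disponibilidades : List (String × List Int)) (out : List (Int × List String)) : Decidable (Spec_arregla_juntada disponibilidades out) := by unfold Spec_arregla_juntada; infer_instance

-- ===== CLAIM (what is proved, stated in full; the proofs are below) =====
def Claim_equal_arregla_juntada : Prop := ∀ (disponibilidades : List (String × List Int)), Dom_arregla_juntada disponibilidades → Pre_arregla_juntada disponibilidades → Spec_arregla_juntada disponibilidades (arregla_juntada disponibilidades)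

-- ===== LEMMAS AND PROOFS =====

-- the common value of coincidencias[k]: friends (in order) whose list does not contain k
def pvVal (disp : List (String × List Int)) (k : Int) : List String :=
  (disp.filter (fun p => !p.2.contains k)).map Prod.fst

-- first-match lookup in the dict equals the entry's own value when keys are distinct
theorem pvLookup (disp : List (String × List Int)) (h : (disp.map Prod.fst).Nodup)
    (p : String × List Int) (hp : p ∈ disp) : (PySem.Dict.mk disp).getD p.1 [] = p.2 := by
  have hk : (PySem.Dict.mk disp).keys.Nodup := by simpa [PySem.Dict.keys_mk] using h
  exact PySem.Dict.getD_of_mem_items _ (by simpa using hp) hk []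

theorem pvAIn_getD_self (disp : List (String × List Int)) (i : Int) :
    ∀ (l : List (String × List Int)) (co : PySem.Dict Int (List String)),
    (l.foldl (pvAIn disp i) co).getD i []
      = co.getD i [] ++ (l.filter (fun p => !((PySem.Dict.mk disp).getD p.1 []).contains i)).map Prod.fst := by
  intro l
  induction l with
  | nil => intro co; simp
  | cons p t ih =>
    intro co
    simp only [List.foldl_cons, pvAIn]
    by_cases hc : (!((PySem.Dict.mk disp).getD p.1 []).contains i) = true
    · rw [if_pos hc, ih, PySem.Dict.getD_modify_self, List.filter_cons, if_pos hc]
      simp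
    · rw [if_neg hc, ih, List.filter_cons, if_neg hc]

theorem pvAIn_getD_ne (disp : List (String × List Int)) (i k : Int) (hne : k ≠ i) :
    ∀ (l : List (String × List Int)) (co : PySem.Dict Int (List String)),
    (l.foldl (pvAIn disp i) co).getD k [] = co.getD k [] := by
  intro l
  induction l with
  | nil => intro co; rfl
  | cons p t ih =>
    intro co
    simp only [List.foldl_cons, pvAIn]
    split
    · rw [ih, PySem.Dict.getD_modify_of_ne _ _ _ hne]
    · exact ih co

theorem pvAIn_keys (disp : List (String × List Int)) (i : Int) :
    ∀ (l : List (String × List Int)) (co : PySem.Dict Int (List String)),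
    co.contains i = true → (l.foldl (pvAIn disp i) co).keys = co.keys := by
  intro l
  induction l with
  | nil => intro co _; rfl
  | cons p t ih =>
    intro co hi
    simp only [List.foldl_cons, pvAIn]
    split
    · rw [ih _ (by simp [PySem.Dict.contains_modify]),
        PySem.Dict.keys_modify, PySem.Dict.keys_insert_of_contains _ _ hi]
    · exact ih co hi

theorem pvAStep_keys (disp : List (String × List Int)) (co : PySem.Dict Int (List String)) (i : Int)
    (h : co.contains i = false) : (pvAStep disp co i).keys = co.keys ++ [i] := by
  unfold pvAStep
  rw [pvAIn_keys disp i disp _ (PySem.Dict.contains_insert_self co i []),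
    PySem.Dict.keys_insert_of_not_contains co [] h]

theorem pvA_preserve (disp : List (String × List Int)) :
    ∀ (ys : List Int) (co : PySem.Dict Int (List String)) (k : Int), k ∉ ys →
    (ys.foldl (pvAStep disp) co).getD k [] = co.getD k [] := by
  intro ys
  induction ys with
  | nil => intro co k _; rfl
  | cons y t ih =>
    intro co k hk
    have hky : k ≠ y := fun h => hk (h ▸ List.mem_cons_self)
    simp only [List.foldl_cons]
    rw [ih _ k (fun h => hk (List.mem_cons_of_mem _ h))]
    unfold pvAStep
    rw [pvAIn_getD_ne disp y k hky, PySem.Dict.getD_insert_of_ne _ _ _ hky]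

theorem pvA_getD (disp : List (String × List Int)) :
    ∀ (ys : List Int) (co : PySem.Dict Int (List String)) (k : Int), ys.Nodup → k ∈ ys →
    (ys.foldl (pvAStep disp) co).getD k []
      = (disp.filter (fun p => !((PySem.Dict.mk disp).getD p.1 []).contains k)).map Prod.fst := by
  intro ys
  induction ys with
  | nil => intro co k _ hk; cases hk
  | cons y t ih =>
    intro co k hnd hk
    rcases List.mem_cons.mp hk with rfl | hk'
    · simp only [List.foldl_cons]
      rw [pvA_preserve disp t _ k (List.nodup_cons.mp hnd).1]
      unfold pvAStep
      rw [pvAIn_getD_self, PySem.Dict.getD_insert_self]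
      simp
    · simp only [List.foldl_cons]
      exact ih _ k (List.nodup_cons.mp hnd).2 hk'

theorem pvA_keys (disp : List (String × List Int)) :
    ∀ (ys : List Int) (co : PySem.Dict Int (List String)),
    (∀ y ∈ ys, y ∉ co.keys) → ys.Nodup →
    (ys.foldl (pvAStep disp) co).keys = co.keys ++ ys := by
  intro ys
  induction ys with
  | nil => intro co _ _; simp
  | cons y t ih =>
    intro co hfresh hnd
    have hy : co.contains y = false := by
      have := hfresh y List.mem_cons_self
      rcases h : co.contains y with _ | _
      · rfl
      · exact absurd ((PySem.Dict.contains_iff_mem_keys co y).mp h) this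
    simp only [List.foldl_cons]
    rw [ih _ ?_ (List.nodup_cons.mp hnd).2, pvAStep_keys disp co y hy]
    · simp
    · intro z hz
      rw [pvAStep_keys disp co y hy]
      intro hmem
      rcases List.mem_append.mp hmem with h1 | h1
      · exact hfresh z (List.mem_cons_of_mem _ hz) h1
      · have hzy : z = y := by simpa using h1
        exact (List.nodup_cons.mp hnd).1 (hzy ▸ hz)

-- B side
theorem pvBIn_keys (a : String) (co : PySem.Dict Int (List String)) (d : Int) :
    (pvBIn a co d).keys = co.keys := by
  unfold pvBIn
  split
  · next h =>
    rw [PySem.Dict.keys_modify, PySem.Dict.keys_insert_of_contains _ _ (Bool.and_elim_left h)]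
  · rfl

theorem pvB_keys : ∀ (l : List (String × List Int)) (co : PySem.Dict Int (List String)),
    (l.foldl pvBStep co).keys = co.keys := by
  intro l
  induction l with
  | nil => intro co; rfl
  | cons p t ih =>
    intro co
    simp only [List.foldl_cons]
    rw [ih]
    show (p.2.foldl (pvBIn p.1) co).keys = co.keys
    generalize p.2 = ds
    induction ds generalizing co with
    | nil => rfl
    | cons d dt ih2 => simp only [List.foldl_cons]; rw [ih2, pvBIn_keys]

theorem pvBIn_getD (a : String) (k : Int) :
    ∀ (ds : List Int) (co : PySem.Dict Int (List String)), co.contains k = true →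
    (ds.foldl (pvBIn a) co).getD k []
      = ds.foldl (fun s d => if d == k && s.contains a then (PySem.List.remove? s a).getD s else s)
          (co.getD k []) := by
  intro ds
  induction ds with
  | nil => intro co _; rfl
  | cons d t ih =>
    intro co hk
    have hkeep : (pvBIn a co d).contains k = true := by
      rw [PySem.Dict.contains_iff_mem_keys] at hk ⊢
      rwa [pvBIn_keys]
    simp only [List.foldl_cons]
    rw [ih _ hkeep]
    congr 1
    by_cases hdk : d = k
    · subst hdk
      unfold pvBIn
      rw [hk, Bool.true_and]
      by_cases hmem : (co.getD d []).contains a = true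
      · rw [if_pos hmem, if_pos (by simp at hmem ⊢; exact hmem : ((d == d && (co.getD d []).contains a) = true)),
          PySem.Dict.getD_modify_self]
      · rw [if_neg hmem, if_neg (by simpa using hmem : ¬((d == d && (co.getD d []).contains a) = true))]
    · have hb : (d == k) = false := by simp [hdk]
      rw [if_neg (by simp [hb] : ¬((d == k && ((co.getD k [] : List String)).contains a) = true))]
      unfold pvBIn
      split
      · rw [PySem.Dict.getD_modify_of_ne _ _ _ (fun h => hdk h.symm)]
      · rfl

theorem pvB_getD (k : Int) :
    ∀ (l : List (String × List Int)) (co : PySem.Dict Int (List String)), co.contains k = true →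
    (l.foldl pvBStep co).getD k []
      = l.foldl (fun s p =>
          p.2.foldl (fun s d => if d == k && s.contains p.1 then (PySem.List.remove? s p.1).getD s else s) s)
          (co.getD k []) := by
  intro l
  induction l with
  | nil => intro co _; rfl
  | cons p t ih =>
    intro co hk
    have hkeep : (pvBStep co p).contains k = true := by
      rw [PySem.Dict.contains_iff_mem_keys] at hk ⊢
      rw [show pvBStep co p = [p].foldl pvBStep co from rfl, pvB_keys]
      exact hk
    simp only [List.foldl_cons]
    rw [ih _ hkeep]
    show _ = _
    congr 1
    show (pvBStep co p).getD k [] = _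
    unfold pvBStep
    exact pvBIn_getD p.1 k p.2 co hk

-- the per-day projection of B's inner loop: a single erase if k occurs among the days
theorem pvErase_once (k : Int) (a : String) :
    ∀ (ds : List Int) (s : List String), s.Nodup →
    ds.foldl (fun s d => if d == k && s.contains a then (PySem.List.remove? s a).getD s else s) s
      = if ds.contains k && s.contains a then s.erase a else s := by
  intro ds
  induction ds with
  | nil => intro s _; simp
  | cons d t ih =>
    intro s hnd
    by_cases hdk : d = k
    · subst hdk
      by_cases hmem : a ∈ s
      · have hc : s.contains a = true := by simpa using hmem
        simp only [List.foldl_cons, BEq.rfl, Bool.true_and, hc, if_pos,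
          PySem.List.remove?_eq_some_erase s a hmem, Option.getD_some]
        rw [ih _ (hnd.erase a)]
        have hna : a ∉ s.erase a := hnd.not_mem_erase
        simp [hna]
      · have hc : s.contains a = false := by simpa using hmem
        simp only [List.foldl_cons, hc, Bool.and_false, if_neg, Bool.false_eq_true, not_false_iff]
        rw [ih _ hnd]
        simp [hmem]
    · have hb : (d == k) = false := by simp [hdk]
      simp only [List.foldl_cons, hb, Bool.false_and, if_neg, Bool.false_eq_true, not_false_iff]
      rw [ih _ hnd]
      have hkd : ¬k = d := fun h => hdk h.symm
      simp [hkd]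

theorem pvB_proj (k : Int) :
    ∀ (l : List (String × List Int)) (pre : List String), (pre ++ l.map Prod.fst).Nodup →
    l.foldl (fun s p =>
        p.2.foldl (fun s d => if d == k && s.contains p.1 then (PySem.List.remove? s p.1).getD s else s) s)
        (pre ++ l.map Prod.fst)
      = pre ++ (l.filter (fun p => !p.2.contains k)).map Prod.fst := by
  intro l
  induction l with
  | nil => intro pre _; simp
  | cons p t ih =>
    intro pre hnd
    have hs : pre ++ (p :: t).map Prod.fst = pre ++ p.1 :: t.map Prod.fst := by simp
    have hmem : p.1 ∈ pre ++ (p :: t).map Prod.fst := by simp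
    simp only [List.foldl_cons]
    rw [pvErase_once k p.1 p.2 _ hnd]
    have hp1pre : p.1 ∉ pre := by
      rw [hs] at hnd
      intro hin
      exact (List.disjoint_of_nodup_append hnd) hin List.mem_cons_self
    by_cases hck : p.2.contains k = true
    · have herase : (pre ++ (p :: t).map Prod.fst).erase p.1 = pre ++ t.map Prod.fst := by
        rw [hs, List.erase_append_right _ hp1pre, List.erase_cons_head]
      simp only [hck, (by simpa using hmem : (pre ++ (p :: t).map Prod.fst).contains p.1 = true),
        Bool.and_self, if_pos, herase]
      have hnd' := hnd.erase p.1
      rw [herase] at hnd'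
      rw [ih pre hnd']
      rw [List.filter_cons, if_neg (by simpa using hck)]
    · have hckf : p.2.contains k = false := by simpa using hck
      simp only [hckf, Bool.false_and, if_neg, Bool.false_eq_true, not_false_iff]
      have hassoc : pre ++ (p :: t).map Prod.fst = (pre ++ [p.1]) ++ t.map Prod.fst := by simp
      rw [hassoc, ih (pre ++ [p.1]) (by rw [← hassoc]; exact hnd)]
      rw [List.filter_cons, if_pos (by simpa using hckf)]
      simp

theorem pvRange_nodup : (PySem.List.pyRange 1 32).Nodup := by decide

theorem arregla_juntada_spec : Claim_equal_arregla_juntada := by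
  intro disp _ hpre
  unfold Spec_arregla_juntada arregla_juntada arregla_juntada_alt
  -- A's final dict
  set DA := (PySem.List.pyRange 1 32).foldl (pvAStep disp) PySem.Dict.empty with hDA
  set DB := disp.foldl pvBStep
      (PySem.Dict.mk ((PySem.List.pyRange 1 32).map (fun d => (d, disp.map Prod.fst)))) with hDB
  have hAkeys : DA.keys = PySem.List.pyRange 1 32 := by
    rw [hDA, pvA_keys disp _ _ (by simp [PySem.Dict.keys_empty]) pvRange_nodup]
    simp [PySem.Dict.keys_empty]
  have hBkeys : DB.keys = PySem.List.pyRange 1 32 := by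
    rw [hDB, pvB_keys]
    simp [PySem.Dict.keys_mk, List.map_map, Function.comp_def]
  have hval : ∀ k ∈ PySem.List.pyRange 1 32, DA.getD k [] = DB.getD k [] := by
    intro k hk
    have hA : DA.getD k []
        = (disp.filter (fun p => !((PySem.Dict.mk disp).getD p.1 []).contains k)).map Prod.fst := by
      rw [hDA]; exact pvA_getD disp _ _ k pvRange_nodup hk
    have hcontB : (PySem.Dict.mk ((PySem.List.pyRange 1 32).map
        (fun d => (d, disp.map Prod.fst)))).contains k = true := by
      rw [PySem.Dict.contains_iff_mem_keys]
      simp only [PySem.Dict.keys_mk, List.map_map, Function.comp_def]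
      simpa using hk
    have hinit : (PySem.Dict.mk ((PySem.List.pyRange 1 32).map
        (fun d => (d, disp.map Prod.fst)))).getD k [] = disp.map Prod.fst := by
      apply PySem.Dict.getD_of_mem_items (k := k) (v := disp.map Prod.fst)
      · exact List.mem_map.mpr ⟨k, hk, rfl⟩
      · simp only [PySem.Dict.keys_mk, List.map_map, Function.comp_def]
        simpa using pvRange_nodup
    have hB : DB.getD k [] = (disp.filter (fun p => !p.2.contains k)).map Prod.fst := by
      rw [hDB, pvB_getD k disp _ hcontB, hinit]
      have := pvB_proj k disp [] (by simpa using hpre)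
      simpa using this
    rw [hA, hB]
    congr 1
    apply List.filter_congr
    intro p hp
    rw [pvLookup disp hpre p hp]
  have hnodA : DA.keys.Nodup := hAkeys ▸ pvRange_nodup
  have hnodB : DB.keys.Nodup := hBkeys ▸ pvRange_nodup
  rw [PySem.Dict.items_eq_map_keys DA hnodA [], PySem.Dict.items_eq_map_keys DB hnodB [],
    hAkeys, hBkeys]
  apply List.map_congr_left
  intro k hk
  rw [hval k hk]
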